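-- pv_equiv track=rewrite | github.com/hawkjo/freebarcodes | freebarcodes/FreeDivSphere.py | _deletion_seq
-- ===== SOURCE A (Python) =====
-- def _deletion_seq(seq, idxtup):
--     """Returns sequence with given deletions from given seq."""
--     if not idxtup:
--         return seq
--     newseq = seq[:idxtup[0]]
--     for i, j in zip(idxtup, idxtup[1:]):
--         newseq += seq[i+1:j]
--     newseq += seq[idxtup[-1]+1:]
--     return newseq
-- ===== SOURCE B (Python) =====
-- def _deletion_seq(seq, idxtup):
--     """Returns sequence with given deletions from given seq."""
--     idxset = set(idxtup)
--     return ''.join(c for i, c in enumerate(seq) if i not in idxset)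
-- ===== Notes on version B (the rewrite author's own statement) =====
-- stated objective: simpler
-- what changed: Replaced the gap-by-gap slice concatenation over consecutive deletion points with a single per-character filtering pass over enumerate(seq) driven by a membership set built from idxtup.
-- outside the precondition, e.g. on _deletion_seq('abcd', (-1,)): A returns 'abcabcd', B returns 'abcd'; on _deletion_seq('abcd', (2, 0)): A returns 'abbcd', B returns 'bd'
import Mathlib
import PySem

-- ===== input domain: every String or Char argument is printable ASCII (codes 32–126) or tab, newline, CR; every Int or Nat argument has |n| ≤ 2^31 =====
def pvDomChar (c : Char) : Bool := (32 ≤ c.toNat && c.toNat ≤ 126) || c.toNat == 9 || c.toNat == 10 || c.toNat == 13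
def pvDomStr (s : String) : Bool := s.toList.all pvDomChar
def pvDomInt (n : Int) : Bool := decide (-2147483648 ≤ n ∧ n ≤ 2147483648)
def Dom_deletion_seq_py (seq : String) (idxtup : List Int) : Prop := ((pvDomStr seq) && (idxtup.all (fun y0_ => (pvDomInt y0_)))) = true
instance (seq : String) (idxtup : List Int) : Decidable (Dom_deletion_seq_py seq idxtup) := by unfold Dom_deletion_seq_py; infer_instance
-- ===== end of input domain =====

-- B replaces A's gap-by-gap slice concatenation with a single per-character filter
-- over enumerate(seq) using a membership set built from idxtup (objective: simpler).

-- ===== PORT A =====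
def deletion_seq_py (seq : String) (idxtup : List Int) : String :=
  match idxtup with
  | [] => seq
  | i0 :: rest =>
    let s := seq.toList
    -- newseq = seq[:idxtup[0]]
    let newseq := PySem.List.slice s none (some i0)
    -- for i, j in zip(idxtup, idxtup[1:]): newseq += seq[i+1:j]
    let newseq := ((i0 :: rest).zip rest).foldl
        (fun acc p => acc ++ PySem.List.slice s (some (p.1 + 1)) (some p.2)) newseq
    -- newseq += seq[idxtup[-1]+1:]
    String.ofList (newseq ++ PySem.List.slice s (some (PySem.List.pyGetD (i0 :: rest) (-1) 0 + 1)) none)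

-- ===== PORT B =====
def deletion_seq_py_alt (seq : String) (idxtup : List Int) : String :=
  let idxset : PySem.Set Int := PySem.Set.ofList idxtup
  String.ofList (((PySem.List.enumerate seq.toList 0).filter
      (fun p => !(PySem.Set.contains idxset p.1))).map (·.2))

-- ===== PRECONDITION & SPEC =====
-- For a nonempty string, Pre_ excludes lists that are not sorted ascending, or that
-- contain a negative index reaching back into the string (-len(seq) ≤ i ≤ -1): there A's
-- slice arithmetic (negative-index wraparound, slices crossing out of order) produces
-- accidental values, while the function is only ever called with sorted non-negative
-- deletion positions.  For the empty string every index list is admitted (both return "").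
def Pre_deletion_seq_py (seq : String) (idxtup : List Int) : Prop :=
  seq.toList = [] ∨
    ((∀ i ∈ idxtup, 0 ≤ i ∨ i ≤ -(seq.toList.length : Int) - 1) ∧ idxtup.Pairwise (· ≤ ·))

instance (seq : String) (idxtup : List Int) : Decidable (Pre_deletion_seq_py seq idxtup) := by
  unfold Pre_deletion_seq_py; infer_instance

def pvWitness_deletion_seq_py : String × List Int := ("abcde", [1, 3])

def Spec_deletion_seq_py (seq : String) (idxtup : List Int) (out : String) : Prop :=
  out = deletion_seq_py_alt seq idxtup

instance (seq : String) (idxtup : List Int) (out : String) : Decidable (Spec_deletion_seq_py seq idxtup out) := by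
  unfold Spec_deletion_seq_py; infer_instance

-- ===== CLAIM (what is proved, stated in full; the proofs are below) =====
def Claim_equal_deletion_seq_py : Prop := ∀ (seq : String) (idxtup : List Int), Dom_deletion_seq_py seq idxtup → Pre_deletion_seq_py seq idxtup → Spec_deletion_seq_py seq idxtup (deletion_seq_py seq idxtup)

-- ===== LEMMAS AND PROOFS =====

-- B's filter, generalized to an arbitrary enumeration offset.
def pvF (s : List Char) (off : Int) (l : List Int) : List Char :=
  ((PySem.List.enumerate s off).filter (fun p => !(decide (p.1 ∈ l)))).map (·.2)

-- relative-offset reference recursion for A's result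
def pvAdel (s : List Char) (off : Int) : List Int → List Char
  | [] => s
  | a :: rest => s.take (a - off).toNat ++ pvAdel (s.drop (a - off + 1).toNat) (a + 1) rest

-- A's tail: the zip loop plus the final slice, in absolute indices.
def pvAtail (s : List Char) (prev : Int) : List Int → List Char
  | [] => PySem.List.slice s (some (prev + 1)) none
  | b :: t => PySem.List.slice s (some (prev + 1)) (some b) ++ pvAtail s b t

theorem pvF_nil_idx (s : List Char) (off : Int) : pvF s off [] = s := by
  simp [pvF, PySem.List.map_snd_enumerate]

theorem pvF_dropHead (s : List Char) (off : Int) (a : Int) (rest : List Int)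
    (h : a < off) : pvF s off (a :: rest) = pvF s off rest := by
  unfold pvF
  congr 1
  apply List.filter_congr
  intro p hp
  rcases (PySem.List.mem_enumerate_iff _ _ _).1 hp with ⟨k, hk, rfl⟩
  have hne : ¬ (off + (k : Int) = a) := by omega
  simp [hne]

theorem pvF_dec (s : List Char) (off : Int) (a : Int) (rest : List Int)
    (hoff : 0 ≤ off) (ha : off - 1 ≤ a) (hrest : ∀ i ∈ rest, a ≤ i) :
    pvF s off (a :: rest) =
      s.take (a - off).toNat ++ pvF (s.drop (a - off + 1).toNat) (a + 1) rest := by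
  induction s generalizing off with
  | nil => simp [pvF, PySem.List.enumerate_nil]
  | cons c s' ih =>
    rcases lt_or_ge a off with hlt | hge
    · -- a = off - 1: nothing to take/drop
      have h1 : (a - off).toNat = 0 := by omega
      have h2 : (a - off + 1).toNat = 0 := by omega
      rw [h1, h2]
      simp only [List.take_zero, List.drop_zero, List.nil_append]
      rw [pvF_dropHead _ _ _ _ hlt]
      have : a + 1 = off := by omega
      rw [this]
    · rcases eq_or_lt_of_le hge with rfl | hgt
      · -- a = off: the head character is deleted
        have h1 : (off - off).toNat = 0 := by omega
        have h2 : (off - off + 1).toNat = 1 := by omega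
        rw [h1, h2]
        simp only [List.take_zero, List.drop_succ_cons, List.drop_zero, List.nil_append]
        unfold pvF
        rw [PySem.List.enumerate_cons, List.filter_cons]
        split_ifs with hcond
        · exfalso; simp at hcond
        · exact pvF_dropHead s' (off + 1) off rest (by omega)
      · -- off < a: the head character is kept
        have hne : ¬ (off ∈ a :: rest) := by
          simp only [List.mem_cons]
          rintro (h1 | h2)
          · omega
          · have := hrest _ h2; omega
        have h1 : (a - off).toNat = (a - (off + 1)).toNat + 1 := by omega
        have h2 : (a - off + 1).toNat = (a - (off + 1) + 1).toNat + 1 := by omega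
        rw [h1, h2]
        simp only [List.take_succ_cons, List.drop_succ_cons]
        unfold pvF
        rw [PySem.List.enumerate_cons, List.filter_cons]
        split_ifs with hcond
        · simp only [List.map_cons, List.cons_append]
          congr 1
          exact ih (off + 1) (by omega) (by omega)
        · exfalso
          simp only [Bool.not_eq_true', decide_eq_false_iff_not] at hcond
          exact hcond hne

theorem pvAdel_eq_pvF (l : List Int) : ∀ (s : List Char) (off : Int),
    0 ≤ off → (∀ i ∈ l, off - 1 ≤ i) → l.Pairwise (· ≤ ·) →
    pvAdel s off l = pvF s off l := by
  induction l with
  | nil => intro s off _ _ _; simp [pvAdel, pvF_nil_idx]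
  | cons a rest ih =>
    intro s off hoff hmem hsort
    have ha : off - 1 ≤ a := hmem a (List.mem_cons_self)
    have hrest : ∀ i ∈ rest, a ≤ i := fun i hi => (List.pairwise_cons.1 hsort).1 i hi
    rw [pvAdel, pvF_dec s off a rest hoff ha hrest]
    congr 1
    exact ih _ (a + 1) (by omega) (fun i hi => by have := hrest i hi; omega)
      (List.pairwise_cons.1 hsort).2

-- the zip-foldl in port A is acc ++ pvAtail (minus the trailing slice folded in)
theorem pvAtail_foldl (s : List Char) : ∀ (rest : List Int) (a : Int) (acc : List Char),
    (((a :: rest).zip rest).foldl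
        (fun acc p => acc ++ PySem.List.slice s (some (p.1 + 1)) (some p.2)) acc) ++
      PySem.List.slice s (some (PySem.List.pyGetD (a :: rest) (-1) 0 + 1)) none
    = acc ++ pvAtail s a rest := by
  intro rest
  induction rest with
  | nil =>
    intro a acc
    simp [pvAtail, PySem.List.pyGetD_neg_one (a :: ([] : List Int)) 0 (by simp)]
  | cons b t ih =>
    intro a acc
    have hlast : PySem.List.pyGetD (a :: b :: t) (-1) 0 = PySem.List.pyGetD (b :: t) (-1) 0 := by
      rw [PySem.List.pyGetD_neg_one (a :: b :: t) 0 (by simp),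
          PySem.List.pyGetD_neg_one (b :: t) 0 (by simp)]
      simp [List.getLast_cons]
    simp only [List.zip_cons_cons, List.foldl_cons, hlast, pvAtail]
    rw [ih b (acc ++ PySem.List.slice s (some (a + 1)) (some b))]
    simp [List.append_assoc]

-- absolute-index pvAtail is relative pvAdel on the dropped suffix
theorem pvAtail_eq_pvAdel (rest : List Int) : ∀ (prev : Int) (s : List Char),
    0 ≤ prev → (∀ i ∈ rest, prev ≤ i) → rest.Pairwise (· ≤ ·) →
    pvAtail s prev rest = pvAdel (s.drop (prev + 1).toNat) (prev + 1) rest := by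
  induction rest with
  | nil =>
    intro prev s hp _ _
    rw [pvAtail, pvAdel, PySem.List.slice_from s (by omega)]
  | cons b t ih =>
    intro prev s hp hmem hsort
    have hb : prev ≤ b := hmem b (List.mem_cons_self)
    rw [pvAtail, pvAdel, ih b s (by omega) (fun i hi => (List.pairwise_cons.1 hsort).1 i hi)
      (List.pairwise_cons.1 hsort).2,
      PySem.List.slice_toNat s (by omega) (by omega), List.drop_drop]
    congr 3
    · omega
    · omega

theorem pvSet_contains (l : List Int) (x : Int) :
    PySem.Set.contains (PySem.Set.ofList l) x = decide (x ∈ l) := by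
  simp [PySem.Set.contains, PySem.Set.mem_ofList]

theorem pvAlt_eq (seq : String) (l : List Int) :
    deletion_seq_py_alt seq l = String.ofList (pvF seq.toList 0 l) := by
  simp only [deletion_seq_py_alt, pvF, pvSet_contains]

-- A's nonempty-case body as a list-level function (abstracted from the port, for the proofs)
def pvA (s : List Char) (a : Int) (rest : List Int) : List Char :=
  (((a :: rest).zip rest).foldl
      (fun acc p => acc ++ PySem.List.slice s (some (p.1 + 1)) (some p.2))
      (PySem.List.slice s none (some a))) ++
    PySem.List.slice s (some (PySem.List.pyGetD (a :: rest) (-1) 0 + 1)) none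

theorem pvClamp0 (n : Nat) (p : Int) (h : p ≤ -(n : Int)) : PySem.List.clampIdx n p = 0 := by
  simp only [PySem.List.clampIdx]
  split_ifs <;> omega

theorem pvSliceToNeg (s : List Char) (p : Int) (h : p ≤ -(s.length : Int)) :
    PySem.List.slice s none (some p) = [] := by
  simp [PySem.List.slice, pvClamp0 s.length p h]

theorem pvSliceFromNeg (s : List Char) (q : Int) (h : q ≤ -(s.length : Int)) :
    PySem.List.slice s (some q) none = s := by
  simp [PySem.List.slice, pvClamp0 s.length q h]

theorem pvSliceDropStart (s : List Char) (q b : Int) (h : q ≤ -(s.length : Int)) :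
    PySem.List.slice s (some q) (some b) = PySem.List.slice s none (some b) := by
  simp [PySem.List.slice, pvClamp0 s.length q h]

theorem pvA_single (s : List Char) (p : Int) (h : p + 1 ≤ -(s.length : Int)) :
    pvA s p [] = s := by
  have hlast : PySem.List.pyGetD ([p] : List Int) (-1) 0 = p := by
    rw [PySem.List.pyGetD_neg_one ([p] : List Int) 0 (by simp)]
    simp
  simp [pvA, hlast, pvSliceToNeg s p (by omega), pvSliceFromNeg s (p + 1) h]

theorem pvA_peel (s : List Char) (p b : Int) (t : List Int) (h : p + 1 ≤ -(s.length : Int)) :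
    pvA s p (b :: t) = pvA s b t := by
  have hlast : PySem.List.pyGetD (p :: b :: t) (-1) 0 = PySem.List.pyGetD (b :: t) (-1) 0 := by
    rw [PySem.List.pyGetD_neg_one (p :: b :: t) 0 (by simp),
        PySem.List.pyGetD_neg_one (b :: t) 0 (by simp)]
    simp [List.getLast_cons]
  simp only [pvA, List.zip_cons_cons, List.foldl_cons, hlast,
    pvSliceToNeg s p (by omega), List.nil_append, pvSliceDropStart s (p + 1) b h]

theorem pvMain (l : List Int) : ∀ (s : List Char),
    (∀ i ∈ l, 0 ≤ i ∨ i ≤ -(s.length : Int) - 1) → l.Pairwise (· ≤ ·) →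
    (match l with | [] => s | a :: rest => pvA s a rest) = pvF s 0 l := by
  induction l with
  | nil => intro s _ _; exact (pvF_nil_idx s 0).symm
  | cons a rest ih =>
    intro s hcond hsort
    have hrestle : ∀ i ∈ rest, a ≤ i := fun i hi => (List.pairwise_cons.1 hsort).1 i hi
    rcases hcond a List.mem_cons_self with ha | ha
    · -- non-negative head: the sorted-nonnegative chain
      show pvA s a rest = pvF s 0 (a :: rest)
      unfold pvA
      rw [pvAtail_foldl s rest a _,
          pvAtail_eq_pvAdel rest a s ha hrestle (List.pairwise_cons.1 hsort).2,
          PySem.List.slice_to s ha]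
      have hAdel : pvAdel s 0 (a :: rest)
          = s.take a.toNat ++ pvAdel (s.drop (a + 1).toNat) (a + 1) rest := by
        rw [pvAdel]
        norm_num
      rw [← hAdel, pvAdel_eq_pvF (a :: rest) s 0 le_rfl
        (fun i hi => by rcases List.mem_cons.1 hi with rfl | hi' <;> [omega; (have := hrestle i hi'; omega)]) hsort]
    · -- phantom head (i ≤ -len-1): contributes nothing on either side
      rw [pvF_dropHead s 0 a rest (by omega)]
      cases rest with
      | nil =>
        show pvA s a [] = pvF s 0 []
        rw [pvA_single s a (by omega)]
        exact (pvF_nil_idx s 0).symm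
      | cons b t =>
        show pvA s a (b :: t) = pvF s 0 (b :: t)
        rw [pvA_peel s a b t (by omega)]
        exact ih s (fun i hi => hcond i (List.mem_cons_of_mem _ hi))
          (List.pairwise_cons.1 hsort).2

theorem pvSliceNil (a b : Option Int) : PySem.List.slice ([] : List Char) a b = [] := by
  cases a <;> cases b <;> simp [PySem.List.slice]

theorem pvF_nil_str (off : Int) (l : List Int) : pvF [] off l = [] := by
  simp [pvF, PySem.List.enumerate_nil]

theorem pvA_nil (a : Int) (rest : List Int) : pvA [] a rest = [] := by
  have hfold : ∀ (z : List (Int × Int)) (acc : List Char),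
      z.foldl (fun acc p => acc ++ PySem.List.slice ([] : List Char)
        (some (p.1 + 1)) (some p.2)) acc = acc := by
    intro z
    induction z with
    | nil => intro acc; rfl
    | cons q z' ih => intro acc; simp [List.foldl_cons, pvSliceNil, ih]
  simp [pvA, hfold, pvSliceNil]

-- ===== VERDICT (by name: the statement is the Claim_ definition above) =====
theorem deletion_seq_py_spec : Claim_equal_deletion_seq_py := by
  intro seq idxtup _ hpre
  unfold Spec_deletion_seq_py
  rw [pvAlt_eq]
  rcases hpre with hemp | ⟨hcond, hsort⟩
  · -- empty string: both sides are ""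
    rw [hemp, pvF_nil_str]
    cases idxtup with
    | nil =>
      show seq = String.ofList []
      rw [← hemp]
      exact String.ofList_toList.symm
    | cons a rest =>
      have hA : deletion_seq_py seq (a :: rest) = String.ofList (pvA seq.toList a rest) := rfl
      rw [hA, hemp, pvA_nil]
  · cases idxtup with
    | nil =>
      rw [pvF_nil_idx]
      exact String.ofList_toList.symm
    | cons a rest =>
      have hA : deletion_seq_py seq (a :: rest) = String.ofList (pvA seq.toList a rest) := rfl
      rw [hA]
      exact congrArg String.ofList (pvMain (a :: rest) seq.toList hcond hsort)
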